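-- pv_equiv track=rewrite | github.com/ShitalBharti/AllWork | Work-03-Jan-2022/_21_string_uppercase.py | con_upper
-- ===== SOURCE A (Python) =====
-- def con_upper(string):
--     new_str = []
--     for char in string:
--         if char >= 'a' and char <= 'z':
--             nchar = chr(ord(char)-32)
--             new_str.append(nchar)
--     opstr = ''.join(new_str)
--     return opstr
-- ===== SOURCE B (Python) =====
-- def con_upper(string):
--     # Table-driven: build one translation table over the distinct character codes
--     # of the input (lowercase code -> uppercase code, anything else -> delete),
--     # then do a single bulk str.translate pass.
--     table = {code: (code - 32 if 97 <= code <= 122 else None)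
--              for code in set(map(ord, string))}
--     return string.translate(table)
-- ===== Notes on version B (the rewrite author's own statement) =====
-- stated objective: alternative
-- what changed: Replaces A's filter-and-convert append loop with a table-driven translation: a dict over the distinct character codes of the input (lowercase->uppercase code, everything else->delete) is built once from set(map(ord, s)), then one bulk str.translate applies it.
import Mathlib
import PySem

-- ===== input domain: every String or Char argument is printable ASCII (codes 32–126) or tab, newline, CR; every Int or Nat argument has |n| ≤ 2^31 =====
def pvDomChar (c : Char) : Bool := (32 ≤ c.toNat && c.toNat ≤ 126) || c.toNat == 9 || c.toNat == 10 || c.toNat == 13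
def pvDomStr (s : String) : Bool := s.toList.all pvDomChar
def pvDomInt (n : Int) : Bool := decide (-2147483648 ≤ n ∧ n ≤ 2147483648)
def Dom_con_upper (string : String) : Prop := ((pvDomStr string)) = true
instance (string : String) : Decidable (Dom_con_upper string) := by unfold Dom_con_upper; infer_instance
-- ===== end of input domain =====

-- B builds one translation table over the input's distinct character codes and applies it in a single translate pass (alternative, table-driven).


-- ===== PORT A =====
-- loop appending chr(ord(c)-32) for each lowercase c, then ''.join
def con_upper (string : String) : String :=
  String.ofList (string.toList.foldl
    (fun acc char => if 'a' ≤ char ∧ char ≤ 'z' then acc ++ [Char.ofNat (char.toNat - 32)] else acc) [])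

-- ===== PORT B =====
-- translation table value for one code: lowercase -> some (code-32), else none (delete)
def pvTableVal (code : Int) : Option Int :=
  if 97 ≤ code ∧ code ≤ 122 then some (code - 32) else none

-- the table: dict over the distinct codes of the input
def pvTable (string : String) : PySem.Dict Int (Option Int) :=
  (PySem.Set.ofList (string.toList.map (fun c => (c.toNat : Int)))).foldl
    (fun d code => d.insert code (pvTableVal code)) PySem.Dict.empty

-- string.translate(table): per char, look its code up (some (some k) → chr k, some none → delete, absent → keep)
def con_upper_alt (string : String) : String :=
  String.ofList (string.toList.flatMap (fun c =>
    match (pvTable string).get? (c.toNat : Int) with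
    | some (some k) => [Char.ofNat k.toNat]
    | some none => []
    | none => [c]))

-- ===== PRECONDITION & SPEC =====
def Spec_con_upper (string : String) (out : String) : Prop := out = con_upper_alt string
instance (string : String) (out : String) : Decidable (Spec_con_upper string out) := by unfold Spec_con_upper; infer_instance

-- ===== CLAIM =====
def Claim_equal_con_upper : Prop := ∀ (string : String), Dom_con_upper string → Spec_con_upper string (con_upper string)

-- ===== LEMMAS AND PROOFS =====
lemma pvTable_get (string : String) (c : Char) (hc : c ∈ string.toList) :
    (pvTable string).get? (c.toNat : Int) = some (pvTableVal (c.toNat : Int)) := by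
  have hitems := PySem.Dict.items_foldl_insert_fresh
      (PySem.Set.ofList (string.toList.map (fun c => (c.toNat : Int)))) id pvTableVal PySem.Dict.empty
      (by intro a _; simp [PySem.Dict.contains_empty])
      (by rw [List.map_id]; exact PySem.Set.nodup_ofList (string.toList.map (fun c => (c.toNat : Int))))
  apply PySem.Dict.get?_of_mem_items
  · show ((c.toNat : Int), pvTableVal (c.toNat : Int)) ∈ (pvTable string).items
    unfold pvTable
    rw [show (fun (d : PySem.Dict Int (Option Int)) (code : Int) => d.insert code (pvTableVal code))
          = (fun (d : PySem.Dict Int (Option Int)) (a : Int) => d.insert (id a) (pvTableVal a)) from rfl,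
        hitems]
    simp only [PySem.Dict.empty, List.nil_append, List.mem_map, id]
    exact ⟨(c.toNat : Int), (PySem.Set.mem_ofList _ _).2 (List.mem_map_of_mem hc), rfl⟩
  · exact PySem.Dict.nodup_keys_foldl_insert _ _ _ (by simp [PySem.Dict.keys, PySem.Dict.empty])

lemma pvFoldA (l : List Char) :
    l.foldl (fun acc char => if 'a' ≤ char ∧ char ≤ 'z' then acc ++ [Char.ofNat (char.toNat - 32)] else acc) []
      = (l.filter (fun c => decide ('a' ≤ c ∧ c ≤ 'z'))).map (fun c => Char.ofNat (c.toNat - 32)) := by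
  simpa using PySem.List.foldl_append_if (fun c => decide ('a' ≤ c ∧ c ≤ 'z'))
    (fun c => Char.ofNat (c.toNat - 32)) l []

-- ===== VERDICT =====
theorem con_upper_spec : Claim_equal_con_upper := by
  intro s _
  unfold Spec_con_upper con_upper con_upper_alt
  rw [pvFoldA]
  apply congrArg
  have key : ∀ c ∈ s.toList,
      (match (pvTable s).get? ((c.toNat : Int)) with
        | some (some k) => [Char.ofNat k.toNat]
        | some none => []
        | none => [c])
      = if decide ('a' ≤ c ∧ c ≤ 'z') then [Char.ofNat (c.toNat - 32)] else [] := by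
    intro c hc
    rw [pvTable_get s c hc]
    have hord : ('a' ≤ c ∧ c ≤ 'z') ↔ (97 ≤ (c.toNat : Int) ∧ (c.toNat : Int) ≤ 122) := by
      constructor
      · intro ⟨h1, h2⟩
        have h1' : (97 : Nat) ≤ c.toNat := h1
        have h2' : c.toNat ≤ 122 := h2
        omega
      · intro ⟨h1, h2⟩
        exact ⟨show (97 : Nat) ≤ c.toNat by omega, show c.toNat ≤ (122 : Nat) by omega⟩
    by_cases h : 'a' ≤ c ∧ c ≤ 'z'
    · have h' := hord.1 h
      simp only [pvTableVal, if_pos h', if_pos (decide_eq_true h)]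
      have : ((c.toNat : Int) - 32).toNat = c.toNat - 32 := by omega
      rw [this]
    · simp only [pvTableVal, if_neg (fun hx => h (hord.2 hx)), decide_eq_false h]
      simp
  rw [List.flatMap_congr key]
  induction s.toList with
  | nil => rfl
  | cons c l ih =>
      by_cases h : 'a' ≤ c ∧ c ≤ 'z'
      · simpa [List.filter_cons, List.flatMap_cons, h, h.1, h.2] using ih
      · rcases not_and_or.1 h with h1 | h1 <;>
          simpa [List.filter_cons, List.flatMap_cons, h, h1] using ih
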